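-- pv_equiv track=rewrite | github.com/seankmartin/Hash_code | 2021/Practice/sean.py | make_draw_arr
-- ===== SOURCE A (Python) =====
-- def make_draw_arr(total_pizzas, order, size_dict):
--     total_used = 0
--     draw_arr = []
--     for val in order:
--         team_size = size_dict[val]
--         for i in range(team_size):
--             if total_used + val <= total_pizzas:
--                 draw_arr.append(val)
--                 total_used += val
--             else:
--                 break
--     return draw_arr
-- ===== SOURCE B (Python) =====
-- def make_draw_arr(total_pizzas, order, size_dict):
--     total_used = 0
--     draw_arr = []
--     for val in order:
--         team_size = size_dict[val]
--         rem = total_pizzas - total_used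
--         if val > 0:
--             k = min(team_size, rem // val)
--         else:
--             k = team_size if val <= rem else 0
--         if k > 0:
--             draw_arr.extend([val] * k)
--             total_used += val * k
--     return draw_arr
-- ===== Notes on version B (the rewrite author's own statement) =====
-- stated objective: alternative
-- what changed: The inner append-one-pizza-at-a-time loop over range(team_size) is replaced by a closed-form capacity count k (remaining//val for positive val, all-or-nothing for val<=0) and a single extend per order entry.
import Mathlib
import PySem

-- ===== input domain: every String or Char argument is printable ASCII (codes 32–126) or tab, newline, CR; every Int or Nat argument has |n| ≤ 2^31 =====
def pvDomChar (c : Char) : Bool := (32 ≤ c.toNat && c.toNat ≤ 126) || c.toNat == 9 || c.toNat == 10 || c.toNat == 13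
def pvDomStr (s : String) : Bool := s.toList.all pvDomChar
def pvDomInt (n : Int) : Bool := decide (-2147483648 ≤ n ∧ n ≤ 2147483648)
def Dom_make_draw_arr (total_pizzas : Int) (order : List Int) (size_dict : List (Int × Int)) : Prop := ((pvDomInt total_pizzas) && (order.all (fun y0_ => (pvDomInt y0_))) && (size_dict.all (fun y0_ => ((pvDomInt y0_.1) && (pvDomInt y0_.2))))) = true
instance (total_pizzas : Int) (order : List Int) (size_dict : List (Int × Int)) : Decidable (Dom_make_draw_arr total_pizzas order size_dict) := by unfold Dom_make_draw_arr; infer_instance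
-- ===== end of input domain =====

-- B replaces A's inner append-until-break loop by a closed-form capacity count k per value
-- and a single extend per order entry (objective: alternative decomposition).

-- ===== PORT A =====
-- inner 'for i in range(team_size): … else: break' loop of A, recursing on the range list
def pvInnerA (total_pizzas val : Int) : List Int → Int × List Int → Int × List Int
  | [], st => st
  | _ :: rest, (total_used, draw_arr) =>
      if total_used + val ≤ total_pizzas then
        pvInnerA total_pizzas val rest (total_used + val, draw_arr ++ [val])
      else (total_used, draw_arr)

def make_draw_arr (total_pizzas : Int) (order : List Int) (size_dict : List (Int × Int)) : List Int :=
  (order.foldl (fun st val =>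
      let team_size := ((PySem.Dict.mk size_dict).get? val).getD 0
      pvInnerA total_pizzas val (PySem.List.pyRange 0 team_size 1) st)
    (0, [])).2

-- ===== PORT B =====
def make_draw_arr_alt (total_pizzas : Int) (order : List Int) (size_dict : List (Int × Int)) : List Int :=
  (order.foldl (fun (st : Int × List Int) val =>
      let team_size := ((PySem.Dict.mk size_dict).get? val).getD 0
      let rem := total_pizzas - st.1
      let k := if val > 0 then min team_size (PySem.Int.floordiv rem val)
               else if val ≤ rem then team_size else 0
      if k > 0 then (st.1 + val * k, st.2 ++ List.replicate k.toNat val) else st)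
    (0, [])).2

-- ===== PRECONDITION & SPEC =====
-- Pre_ excludes exactly the inputs where A raises KeyError: some order value missing from size_dict.
def Pre_make_draw_arr (total_pizzas : Int) (order : List Int) (size_dict : List (Int × Int)) : Prop :=
  ∀ v ∈ order, v ∈ size_dict.map Prod.fst
instance (total_pizzas : Int) (order : List Int) (size_dict : List (Int × Int)) : Decidable (Pre_make_draw_arr total_pizzas order size_dict) := by unfold Pre_make_draw_arr; infer_instance
def pvWitness_make_draw_arr : Int × List Int × (List (Int × Int)) := (10, [2, 1, 2], [(2, 3), (1, 5)])

def Spec_make_draw_arr (total_pizzas : Int) (order : List Int) (size_dict : List (Int × Int)) (out : List Int) : Prop := out = make_draw_arr_alt total_pizzas order size_dict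
instance (total_pizzas : Int) (order : List Int) (size_dict : List (Int × Int)) (out : List Int) : Decidable (Spec_make_draw_arr total_pizzas order size_dict out) := by unfold Spec_make_draw_arr; infer_instance

-- ===== CLAIM (what is proved, stated in full; the proofs are below) =====
def Claim_equal_make_draw_arr : Prop := ∀ (total_pizzas : Int) (order : List Int) (size_dict : List (Int × Int)), Dom_make_draw_arr total_pizzas order size_dict → Pre_make_draw_arr total_pizzas order size_dict → Spec_make_draw_arr total_pizzas order size_dict (make_draw_arr total_pizzas order size_dict)

-- ===== LEMMAS AND PROOFS =====

-- A's inner loop only looks at the length of the range list; this characterises it by B's k formula.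
theorem pvInnerA_char (total_pizzas val : Int) (l : List Int) :
    ∀ (used : Int) (arr : List Int),
      pvInnerA total_pizzas val l (used, arr) =
        (let rem := total_pizzas - used
         let k := if val > 0 then min (l.length : Int) (PySem.Int.floordiv rem val)
                  else if val ≤ rem then (l.length : Int) else 0
         if k > 0 then (used + val * k, arr ++ List.replicate k.toNat val) else (used, arr)) := by
  induction l with
  | nil =>
    intro used arr
    simp only [pvInnerA, List.length_nil, Nat.cast_zero]
    split_ifs <;> simp_all
  | cons a l ih =>
    intro used arr
    simp only [pvInnerA]
    by_cases hc : used + val ≤ total_pizzas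
    · rw [if_pos hc, ih]
      simp only []
      have erem : total_pizzas - (used + val) = total_pizzas - used - val := by ring
      by_cases hv : val > 0
      · -- positive val: floordiv rem val ≥ 1 since val ≤ rem, and it shifts by 1 per step
        have h1 : 1 ≤ PySem.Int.floordiv (total_pizzas - used) val :=
          (PySem.Int.le_floordiv_iff_mul_le hv).mpr (by omega)
        have hfd : PySem.Int.floordiv (total_pizzas - used - val) val
                    = PySem.Int.floordiv (total_pizzas - used) val - 1 := by
          rw [PySem.Int.floordiv_eq_ediv_of_pos hv, PySem.Int.floordiv_eq_ediv_of_pos hv]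
          rw [show total_pizzas - used - val = total_pizzas - used + (-1) * val by ring]
          rw [Int.add_mul_ediv_right _ _ (by omega : val ≠ 0)]
          ring
        simp only [hv, if_true, erem, hfd, List.length_cons]
        set f := PySem.Int.floordiv (total_pizzas - used) val with hf
        have hk : min ((l.length : Int) + 1) f = min (l.length : Int) (f - 1) + 1 := by omega
        by_cases hk0 : (0:Int) < min (l.length : Int) (f - 1)
        · rw [if_pos hk0, if_pos (by push_cast; omega)]
          simp only [Prod.mk.injEq]
          refine ⟨by push_cast [hk]; ring, ?_⟩
          push_cast [hk]
          rw [show (min (l.length : Int) (f-1) + 1).toNat = (min (l.length : Int) (f-1)).toNat + 1 by omega]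
          simp [List.replicate_succ, List.append_assoc]
        · rw [if_neg hk0, if_pos (by push_cast; omega)]
          have h2 : min ((l.length : Int) + 1) f = 1 := by push_cast at hk0 ⊢; omega
          push_cast
          rw [h2]
          simp
      · -- val ≤ 0: once the condition holds it holds forever
        have hle : val ≤ total_pizzas - used := by omega
        have hle' : val ≤ total_pizzas - (used + val) := by omega
        simp only [hv, if_false, hle, hle', if_true, List.length_cons]
        by_cases hn : (0:Int) < (l.length : Int)
        · rw [if_pos hn, if_pos (by push_cast; omega)]
          simp only [Prod.mk.injEq]
          refine ⟨by push_cast; ring, ?_⟩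
          push_cast
          rw [show ((l.length : Int) + 1).toNat = ((l.length : Int)).toNat + 1 by omega]
          simp [List.replicate_succ, List.append_assoc]
        · have h0 : (l.length : Int) = 0 := by omega
          rw [if_neg hn, if_pos (by push_cast at h0 ⊢; omega)]
          have : l.length = 0 := by omega
          simp [this]
    · rw [if_neg hc]
      by_cases hv : val > 0
      · have hfd : PySem.Int.floordiv (total_pizzas - used) val < 1 :=
          (PySem.Int.floordiv_lt_iff_lt_mul hv).mpr (by omega)
        simp only [hv, if_true]
        rw [if_neg (by omega)]
      · have : ¬ (val ≤ total_pizzas - used) := by omega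
        simp only [hv, if_false, this, if_false]
        rw [if_neg (by omega)]

theorem pv_step_eq (total_pizzas : Int) (size_dict : List (Int × Int)) :
    ∀ (st : Int × List Int) (val : Int),
      (let team_size := ((PySem.Dict.mk size_dict).get? val).getD 0
       pvInnerA total_pizzas val (PySem.List.pyRange 0 team_size 1) st) =
      (let team_size := ((PySem.Dict.mk size_dict).get? val).getD 0
       let rem := total_pizzas - st.1
       let k := if val > 0 then min team_size (PySem.Int.floordiv rem val)
                else if val ≤ rem then team_size else 0
       if k > 0 then (st.1 + val * k, st.2 ++ List.replicate k.toNat val) else st) := by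
  intro st val
  obtain ⟨used, arr⟩ := st
  simp only []
  set ts := ((PySem.Dict.mk size_dict).get? val).getD 0 with hts
  have hlen : ((PySem.List.pyRange 0 ts 1).length : Int) = max ts 0 := by
    simp [PySem.List.pyRange]
  rw [pvInnerA_char]
  simp only [hlen]
  by_cases hts0 : 0 ≤ ts
  · have h : max ts 0 = ts := by omega
    rw [h]
  · have hmax : max ts 0 = 0 := by omega
    rw [hmax]
    split_ifs <;> first | rfl | omega

theorem pv_foldl_ext {α β : Type} (f g : β → α → β) (h : ∀ s a, f s a = g s a) :
    ∀ (l : List α) (init : β), l.foldl f init = l.foldl g init := by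
  intro l
  induction l with
  | nil => intro init; rfl
  | cons a l ih => intro init; simp only [List.foldl, h, ih]

-- ===== VERDICT (by name: the statement is the Claim_ definition above) =====
theorem make_draw_arr_spec : Claim_equal_make_draw_arr := by
  intro total_pizzas order size_dict _ _
  unfold Spec_make_draw_arr make_draw_arr make_draw_arr_alt
  rw [pv_foldl_ext _ _ (pv_step_eq total_pizzas size_dict)]
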